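-- pv_equiv track=rewrite | github.com/remizu23/Okinawa_RF | code/KP_RF_inf_path_real.py | calculate_stay_counts_seq
-- ===== SOURCE A (Python) =====
-- def calculate_stay_counts_seq(seq):
--     counts = []
--     current_val = -1
--     counter = 0
--     for val in seq:
--         if val == current_val:
--             counter += 1
--         else:
--             counter = 1
--             current_val = val
--         counts.append(counter)
--     return counts
-- ===== SOURCE B (Python) =====
-- from bisect import bisect_right
--
--
-- def calculate_stay_counts_seq(seq):
--     starts = [i for i in range(len(seq)) if i == 0 or seq[i] != seq[i - 1]]
--     return [i - starts[bisect_right(starts, i) - 1] + 1 for i in range(len(seq))]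
-- ===== Notes on version B (the rewrite author's own statement) =====
-- stated objective: alternative
-- what changed: Replaces the flat streaming loop carrying current_val/counter state with a two-stage algorithm: first precompute the sorted list of run-start indices, then answer each position independently as i - (greatest run start <= i) + 1 found by bisect_right binary search.
import Mathlib
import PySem

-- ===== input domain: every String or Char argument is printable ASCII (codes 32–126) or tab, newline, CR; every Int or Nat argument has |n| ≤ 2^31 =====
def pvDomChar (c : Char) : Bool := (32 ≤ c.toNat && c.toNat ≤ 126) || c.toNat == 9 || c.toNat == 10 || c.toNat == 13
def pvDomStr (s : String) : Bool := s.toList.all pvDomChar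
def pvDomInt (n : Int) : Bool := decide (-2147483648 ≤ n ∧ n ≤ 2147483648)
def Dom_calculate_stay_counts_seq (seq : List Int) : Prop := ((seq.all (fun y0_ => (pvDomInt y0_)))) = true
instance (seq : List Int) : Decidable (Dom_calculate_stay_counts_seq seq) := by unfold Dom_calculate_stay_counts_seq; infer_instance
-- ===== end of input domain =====

-- B replaces A's flat stateful loop (current_val/counter) by a two-stage algorithm:
-- precompute the run-start indices, then compute each position's count independently
-- via binary search (bisect_right) for the greatest run start ≤ i (alternative, not faster).


-- ===== PORT A =====
-- A's for-loop, carried state (current_val, counter), counts built front-to-back.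
def pvGoA : List Int → Int → Int → List Int
  | [], _, _ => []
  | v :: rest, cur, c =>
    if v == cur then (c + 1) :: pvGoA rest cur (c + 1)
    else (1 : Int) :: pvGoA rest v 1

def calculate_stay_counts_seq (seq : List Int) : List Int := pvGoA seq (-1) 0

-- ===== PORT B =====
-- Source B stage 1: starts = [i for i in range(len(seq)) if i == 0 or seq[i] != seq[i-1]]
-- (all indices touched are in range, so getD is exact here).
def pvStarts (seq : List Int) : List Nat :=
  (List.range seq.length).filter (fun i => decide (i = 0) || !(seq.getD i 0 == seq.getD (i - 1) 0))

-- bisect.bisect_right (a library call in Source B) ported by its contract on sorted lists: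
-- the number of elements ≤ x.
def pvBisectRight (a : List Nat) (x : Nat) : Nat := (a.takeWhile (· ≤ x)).length

-- Source B stage 2: [i - starts[bisect_right(starts, i) - 1] + 1 for i in range(len(seq))]
-- (starts[0] = 0 whenever seq ≠ [], so the index is always in range; getD is exact).
def calculate_stay_counts_seq_alt (seq : List Int) : List Int :=
  let starts := pvStarts seq
  (List.range seq.length).map (fun i : Nat =>
    ((i : Int)) - ((starts.getD (pvBisectRight starts i - 1) 0 : Nat) : Int) + 1)

-- ===== PRECONDITION & SPEC =====
def Spec_calculate_stay_counts_seq (seq : List Int) (out : List Int) : Prop := out = calculate_stay_counts_seq_alt seq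
instance (seq : List Int) (out : List Int) : Decidable (Spec_calculate_stay_counts_seq seq out) := by unfold Spec_calculate_stay_counts_seq; infer_instance

-- ===== CLAIM (what is proved, stated in full; the proofs are below) =====
def Claim_equal_calculate_stay_counts_seq : Prop := ∀ (seq : List Int), Dom_calculate_stay_counts_seq seq → Spec_calculate_stay_counts_seq seq (calculate_stay_counts_seq seq)

-- ===== LEMMAS AND PROOFS =====

-- canonical run-decomposition form both ports are proved equal to
def pvRuns : List Int → List Int
  | [] => []
  | x :: xs =>
    ((List.range ((xs.takeWhile (· == x)).length + 1)).map (fun i : Nat => (i : Int) + 1)) ++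
      pvRuns (xs.dropWhile (· == x))
termination_by seq => seq.length
decreasing_by
  simpa using Nat.lt_succ_of_le (List.length_dropWhile_le _ _)

-- ---- A = pvRuns ----
def pvTail : List Int → List Int
  | [] => []
  | y :: ys => (1 : Int) :: pvGoA ys y 1

theorem pvRangeMapSucc (c : Int) (n : Nat) :
    (List.range (n + 1)).map (fun i : Nat => c + 1 + (i : Int)) =
      (c + 1) :: (List.range n).map (fun i : Nat => c + 1 + 1 + (i : Int)) := by
  rw [List.range_succ_eq_map, List.map_cons, List.map_map]
  congr 1
  · push_cast; ring
  · congr 1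
    funext i
    simp only [Function.comp]
    push_cast
    ring

theorem pvGoA_run (xs : List Int) (x c : Int) :
    pvGoA xs x c =
      (List.range (xs.takeWhile (· == x)).length).map (fun i : Nat => c + 1 + (i : Int)) ++
        pvTail (xs.dropWhile (· == x)) := by
  induction xs generalizing c with
  | nil => simp [pvGoA, pvTail]
  | cons v rest ih =>
    by_cases h : v = x
    · subst h
      simp only [pvGoA, List.takeWhile, List.dropWhile, beq_self_eq_true]
      rw [if_pos trivial, ih (c + 1), List.length_cons, pvRangeMapSucc, List.cons_append]
    · have hb : (v == x) = false := by simpa using h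
      simp [pvGoA, pvTail, hb, List.takeWhile, List.dropWhile]

theorem pvTail_eq_runs : ∀ d : List Int, pvTail d = pvRuns d
  | [] => by simp [pvTail, pvRuns]
  | y :: ys => by
    have hrec := pvTail_eq_runs (ys.dropWhile (· == y))
    rw [pvTail, pvGoA_run ys y 1, pvRuns, hrec]
    rw [show (fun i : Nat => (i : Int) + 1) = (fun i : Nat => (0 : Int) + 1 + (i : Int)) by
          funext i; ring,
        pvRangeMapSucc, List.cons_append]
    norm_num
termination_by d => d.length
decreasing_by
  simpa using Nat.lt_succ_of_le (List.length_dropWhile_le _ _)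

theorem pvA_eq_runs (seq : List Int) : calculate_stay_counts_seq seq = pvRuns seq := by
  cases seq with
  | nil => simp [calculate_stay_counts_seq, pvGoA, pvRuns]
  | cons x xs =>
    have h1 : calculate_stay_counts_seq (x :: xs) = pvTail (x :: xs) := by
      unfold calculate_stay_counts_seq pvGoA pvTail
      by_cases h : x = -1
      · subst h; simp
      · have hb : (x == (-1 : Int)) = false := by simpa using h
        simp [hb]
    rw [h1, pvTail_eq_runs]

-- ---- B = pvRuns ----
theorem pvGetRun' (x : Int) (t r : List Int) (hmem : ∀ y ∈ t, (y == x) = true)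
    (i : Nat) (hi : i < t.length + 1) :
    (x :: (t ++ r)).getD i 0 = x := by
  cases i with
  | zero => rfl
  | succ i' =>
    have hi' : i' < t.length := by omega
    have h1 : (x :: (t ++ r)).getD (i' + 1) 0 = (t ++ r).getD i' 0 := rfl
    rw [h1, List.getD_append _ _ _ _ hi', List.getD_eq_getElem _ _ hi']
    have := hmem _ (List.getElem_mem hi')
    exact eq_of_beq this

theorem pvGetRest' (x : Int) (t r : List Int) (j : Nat) :
    (x :: (t ++ r)).getD (t.length + 1 + j) 0 = r.getD j 0 := by
  have h1 : t.length + 1 + j = (t.length + j) + 1 := by omega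
  rw [h1]
  have h2 : (x :: (t ++ r)).getD ((t.length + j) + 1) 0 = (t ++ r).getD (t.length + j) 0 := rfl
  rw [h2, List.getD_append_right _ _ _ _ (by omega)]
  congr 1
  omega

theorem pvStarts_cons (z : Int) (zs : List Int) :
    ∃ L, pvStarts (z :: zs) = 0 :: L := by
  unfold pvStarts
  rw [List.length_cons, List.range_succ_eq_map, List.filter_cons]
  simp only [decide_true, Bool.true_or, if_true]
  exact ⟨_, rfl⟩

theorem pvStarts_run (x : Int) (xs : List Int) :
    pvStarts (x :: xs) =
      0 :: (pvStarts (xs.dropWhile (· == x))).map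
            (fun s => (xs.takeWhile (· == x)).length + 1 + s) := by
  obtain ⟨t, ht⟩ : ∃ t, xs.takeWhile (· == x) = t := ⟨_, rfl⟩
  obtain ⟨r, hr⟩ : ∃ r, xs.dropWhile (· == x) = r := ⟨_, rfl⟩
  have hmem : ∀ y ∈ t, (y == x) = true := by
    rw [← ht]
    exact fun y hy => List.mem_takeWhile_imp (l := xs) (p := fun v => v == x) hy
  have hhead : ∀ y ys, r = y :: ys → (y == x) = false := by
    intro y ys h
    have hne : xs.dropWhile (· == x) ≠ [] := by rw [hr, h]; simp
    have hh := List.head_dropWhile_not (fun v => v == x) hne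
    have : (xs.dropWhile (· == x)).head hne = y := by
      have := hr.trans h
      simp [this]
    rw [this] at hh
    simpa using hh
  have hx : t ++ r = xs := by rw [← ht, ← hr]; exact List.takeWhile_append_dropWhile
  rw [ht, hr, ← hx]
  clear ht hr hx
  set m := t.length + 1 with hm
  have hlen : (x :: (t ++ r)).length = m + r.length := by
    rw [List.length_cons, List.length_append]; omega
  unfold pvStarts
  rw [hlen, List.range_add, List.filter_append, List.filter_map]
  have hpart1 : (List.range m).filter
      (fun i => decide (i = 0) ||
        !((x :: (t ++ r)).getD i 0 == (x :: (t ++ r)).getD (i - 1) 0)) = [0] := by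
    rw [hm, List.range_succ_eq_map, List.filter_cons]
    simp only [decide_true, Bool.true_or, if_true]
    have hnil : (List.filter
        (fun i => decide (i = 0) ||
          !((x :: (t ++ r)).getD i 0 == (x :: (t ++ r)).getD (i - 1) 0))
        (List.map Nat.succ (List.range t.length))) = [] := by
      rw [List.filter_eq_nil_iff]
      intro a ha
      rcases List.mem_map.mp ha with ⟨i, hi, rfl⟩
      have hi' : i < t.length := List.mem_range.mp hi
      have g1 : (x :: (t ++ r)).getD (i + 1) 0 = x := pvGetRun' x t r hmem (i + 1) (by omega)
      have g2 : (x :: (t ++ r)).getD (i + 1 - 1) 0 = x := pvGetRun' x t r hmem i (by omega)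
      simp only [Nat.succ_eq_add_one]
      rw [g1, g2]
      simp
    rw [hnil]
  rw [hpart1]
  have hcongr : ∀ j ∈ List.range r.length,
      ((fun i => decide (i = 0) ||
          !((x :: (t ++ r)).getD i 0 == (x :: (t ++ r)).getD (i - 1) 0)) ∘
        (fun j => m + j)) j
      = (fun i => decide (i = 0) || !(r.getD i 0 == r.getD (i - 1) 0)) j := by
    intro j hj
    have hjr : j < r.length := List.mem_range.mp hj
    cases j with
    | zero =>
      rcases r with _ | ⟨y, ys⟩
      · simp at hjr
      · have hy : (y == x) = false := hhead y ys rfl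
        have g1 : (x :: (t ++ (y :: ys))).getD (m + 0) 0 = y := by
          have := pvGetRest' x t (y :: ys) 0
          simpa [hm] using this
        have g2 : (x :: (t ++ (y :: ys))).getD (m + 0 - 1) 0 = x := by
          have h' : m + 0 - 1 = m - 1 := by omega
          rw [h']
          exact pvGetRun' x t (y :: ys) hmem (m - 1) (by omega)
        show (decide (m + 0 = 0) ||
            !((x :: (t ++ (y :: ys))).getD (m + 0) 0 == (x :: (t ++ (y :: ys))).getD (m + 0 - 1) 0))
          = (decide ((0 : Nat) = 0) || !((y :: ys).getD 0 0 == (y :: ys).getD (0 - 1) 0))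
        rw [g1, g2]
        simp [hy]
    | succ j' =>
      have g1 : (x :: (t ++ r)).getD (m + (j' + 1)) 0 = r.getD (j' + 1) 0 := by
        have := pvGetRest' x t r (j' + 1); simpa [hm] using this
      have g2 : (x :: (t ++ r)).getD (m + (j' + 1) - 1) 0 = r.getD j' 0 := by
        have h' : m + (j' + 1) - 1 = m + j' := by omega
        rw [h']
        have := pvGetRest' x t r j'; simpa [hm] using this
      show (decide (m + (j' + 1) = 0) ||
          !((x :: (t ++ r)).getD (m + (j' + 1)) 0 == (x :: (t ++ r)).getD (m + (j' + 1) - 1) 0))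
        = (decide (j' + 1 = 0) || !(r.getD (j' + 1) 0 == r.getD (j' + 1 - 1) 0))
      rw [g1, g2]
      have hne : m + (j' + 1) ≠ 0 := by omega
      simp
  rw [List.filter_congr hcongr]
  rfl

theorem pvVal_lo (S' : List Nat) (m i : Nat) (hi : i < m) :
    ((i : Int)) - (((0 :: S'.map (fun s => m + s)).getD
        (pvBisectRight (0 :: S'.map (fun s => m + s)) i - 1) 0 : Nat) : Int) + 1
      = (i : Int) + 1 := by
  have htail : (S'.map (fun s => m + s)).takeWhile (fun a => decide (a ≤ i)) = [] := by
    cases S' with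
    | nil => rfl
    | cons s ss =>
      simp only [List.map_cons, List.takeWhile_cons]
      have hf : decide (m + s ≤ i) = false := by
        simp only [decide_eq_false_iff_not]
        omega
      rw [hf]
      simp
  have h1 : pvBisectRight (0 :: S'.map (fun s => m + s)) i = 1 := by
    unfold pvBisectRight
    rw [List.takeWhile_cons]
    simp [htail]
  rw [h1]
  simp

theorem pvVal_hi (L : List Nat) (m j : Nat) :
    (((m + j : Nat)) : Int) - (((0 :: (0 :: L).map (fun s => m + s)).getD
        (pvBisectRight (0 :: (0 :: L).map (fun s => m + s)) (m + j) - 1) 0 : Nat) : Int) + 1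
      = ((j : Int)) - (((0 :: L).getD (pvBisectRight (0 :: L) j - 1) 0 : Nat) : Int) + 1 := by
  have hmap : (((0 :: L).map (fun s => m + s)).takeWhile (fun a => decide (a ≤ m + j)))
      = ((0 :: L).takeWhile (fun s => decide (s ≤ j))).map (fun s => m + s) := by
    rw [List.takeWhile_map]
    have hp : ((fun a => decide (a ≤ m + j)) ∘ fun s => m + s)
        = (fun s : Nat => decide (s ≤ j)) := by
      funext s
      simp only [Function.comp]
      rw [decide_eq_decide]
      omega
    rw [hp]
  have hk : pvBisectRight (0 :: (0 :: L).map (fun s => m + s)) (m + j)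
      = pvBisectRight (0 :: L) j + 1 := by
    unfold pvBisectRight
    rw [List.takeWhile_cons]
    simp only [Nat.zero_le, decide_true, if_true]
    rw [hmap]
    simp [Nat.add_comm]
  have hk1 : 1 ≤ pvBisectRight (0 :: L) j := by
    unfold pvBisectRight
    rw [List.takeWhile_cons]
    simp
  have hk2 : pvBisectRight (0 :: L) j ≤ (0 :: L).length :=
    (List.takeWhile_sublist _).length_le
  have hgd : (0 :: (0 :: L).map (fun s => m + s)).getD (pvBisectRight (0 :: L) j) 0
      = m + (0 :: L).getD (pvBisectRight (0 :: L) j - 1) 0 := by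
    obtain ⟨k'', hkk⟩ : ∃ k'', pvBisectRight (0 :: L) j = k'' + 1 :=
      ⟨pvBisectRight (0 :: L) j - 1, by omega⟩
    rw [hkk]
    simp only [Nat.add_sub_cancel]
    have hlt : k'' < (0 :: L).length := by
      rw [hkk] at hk2; simpa using hk2
    have h2 : (0 :: (0 :: L).map (fun s => m + s)).getD (k'' + 1) 0
        = ((0 :: L).map (fun s => m + s)).getD k'' 0 := rfl
    rw [h2, List.getD_eq_getElem _ _ (by simpa using hlt), List.getElem_map,
      List.getD_eq_getElem _ _ hlt]
  rw [hk]
  simp only [Nat.add_sub_cancel]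
  rw [hgd]
  push_cast
  ring

theorem pvAlt_eq (s : List Int) :
    calculate_stay_counts_seq_alt s = (List.range s.length).map (fun i : Nat =>
      ((i : Int)) - (((pvStarts s).getD (pvBisectRight (pvStarts s) i - 1) 0 : Nat) : Int) + 1) :=
  rfl

theorem pvB_eq_runs : ∀ seq : List Int, calculate_stay_counts_seq_alt seq = pvRuns seq
  | [] => by simp [calculate_stay_counts_seq_alt, pvStarts, pvRuns]
  | x :: xs => by
    have hrec := pvB_eq_runs (xs.dropWhile (· == x))
    have hx : xs.takeWhile (· == x) ++ xs.dropWhile (· == x) = xs :=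
      List.takeWhile_append_dropWhile
    have hlen : (x :: xs).length = ((xs.takeWhile (· == x)).length + 1) + (xs.dropWhile (· == x)).length := by
      have h := congrArg List.length hx
      rw [List.length_append] at h
      rw [List.length_cons]
      omega
    rw [pvAlt_eq, pvStarts_run x xs, hlen, List.range_add, List.map_append, List.map_map]
    rw [pvRuns]
    congr 1
    · apply List.map_congr_left
      intro i hi
      exact pvVal_lo (pvStarts (xs.dropWhile (· == x))) ((xs.takeWhile (· == x)).length + 1) i
        (List.mem_range.mp hi)
    · rw [← hrec, pvAlt_eq]
      apply List.map_congr_left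
      intro j hj
      have hjr : j < (xs.dropWhile (· == x)).length := List.mem_range.mp hj
      rcases hd : xs.dropWhile (· == x) with _ | ⟨y, ys⟩
      · simp [hd] at hjr
      · obtain ⟨L, hL⟩ := pvStarts_cons y ys
        rw [hL]
        simp only [Function.comp]
        exact pvVal_hi L ((xs.takeWhile (· == x)).length + 1) j
termination_by seq => seq.length
decreasing_by
  simpa using Nat.lt_succ_of_le (List.length_dropWhile_le _ _)

theorem pvA_eq_alt (seq : List Int) :
    calculate_stay_counts_seq seq = calculate_stay_counts_seq_alt seq := by
  rw [pvA_eq_runs, pvB_eq_runs]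

-- ===== VERDICT (by name: the statement is the Claim_ definition above) =====
theorem calculate_stay_counts_seq_spec : Claim_equal_calculate_stay_counts_seq := by
  intro seq _
  exact pvA_eq_alt seq
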